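-- pv_equiv track=rewrite | github.com/hugeclear/rango | eval/report.py | _analyze_metric_patterns
-- ===== SOURCE A (Python) =====
-- from typing import Dict, List, Any, Optional
--
-- def _analyze_metric_patterns(results: Dict[str, Dict[str, Any]]) -> List[str]:
--     """Analyze patterns across different metrics"""
--     insights = []
--
--     # Get all metrics
--     all_metrics = set()
--     for result in results.values():
--         all_metrics.update(result['metrics'].keys())
--
--     # Analyze correlation between metrics
--     metric_correlations = {}
--     conditions = list(results.keys())
--
--     for metric in all_metrics:
--         if metric.endswith('_f1') or metric in ['exact_match', 'f1_score', 'bleu_score']: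
--             scores = [results[cond]['metrics'].get(metric, 0) for cond in conditions]
--             if len(set(scores)) > 1:  # Has variation
--                 metric_correlations[metric] = scores
--
--     if metric_correlations:
--         insights.extend([
--             "- Metric correlations suggest [TODO: implement correlation analysis]",
--             "- ROUGE-L and F1 scores show [TODO: implement pattern analysis]"
--         ])
--
--     return insights
-- ===== SOURCE B (Python) =====
-- def _analyze_metric_patterns(results):
--     """Analyze patterns across different metrics"""
--     runs = [r['metrics'] for r in results.values()]
--     changed = any(
--         (m.endswith('_f1') or m in ('exact_match', 'f1_score', 'bleu_score'))
--         and a.get(m, 0) != b.get(m, 0)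
--         for a, b in zip(runs, runs[1:])
--         for m in (*a, *b)
--     )
--     if changed:
--         return [
--             "- Metric correlations suggest [TODO: implement correlation analysis]",
--             "- ROUGE-L and F1 scores show [TODO: implement pattern analysis]",
--         ]
--     return []
-- ===== Notes on version B (the rewrite author's own statement) =====
-- stated objective: alternative
-- what changed: B never builds A's global metric-name set or the metric_correlations dict of score lists; it compares consecutive runs pairwise (zip(runs, runs[1:])) and declares variation as soon as one adjacent pair disagrees on a qualifying metric in either pair's keys, which is equivalent because a score list has >1 distinct values iff some consecutive pair differs, and a differing pair has a nonzero side whose dict contains the metric.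
import Mathlib
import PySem

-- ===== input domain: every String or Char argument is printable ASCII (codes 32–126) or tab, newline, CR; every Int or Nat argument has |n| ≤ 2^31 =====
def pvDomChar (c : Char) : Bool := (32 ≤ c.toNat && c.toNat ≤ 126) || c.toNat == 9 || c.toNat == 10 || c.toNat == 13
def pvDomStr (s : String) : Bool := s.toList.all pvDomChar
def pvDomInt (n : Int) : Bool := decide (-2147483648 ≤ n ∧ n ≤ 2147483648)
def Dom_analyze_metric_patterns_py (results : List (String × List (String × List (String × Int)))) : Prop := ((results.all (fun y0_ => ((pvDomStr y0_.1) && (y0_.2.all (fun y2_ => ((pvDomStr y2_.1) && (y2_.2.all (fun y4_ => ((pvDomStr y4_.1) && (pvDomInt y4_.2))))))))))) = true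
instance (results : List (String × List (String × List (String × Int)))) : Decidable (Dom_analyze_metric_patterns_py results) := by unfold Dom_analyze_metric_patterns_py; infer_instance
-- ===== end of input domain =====

-- B drops A's global metric-set / score-dict pipeline and instead compares consecutive runs pairwise (zip(runs, runs[1:])); equivalence on all inputs where A does not raise KeyError.

-- Shared input normalisation: the raw association lists stand for Python dicts
-- (duplicate keys: last value wins, first position — PySem.Dict.ofList is exact there).
def pvAsDict (results : List (String × List (String × List (String × Int)))) :
    PySem.Dict String (PySem.Dict String (PySem.Dict String Int)) :=
  PySem.Dict.ofList (results.map (fun p =>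
    (p.1, PySem.Dict.ofList (p.2.map (fun q => (q.1, PySem.Dict.ofList q.2))))))

-- metric.endswith('_f1') or metric in ['exact_match', 'f1_score', 'bleu_score']
def pvQualifies (metric : String) : Bool :=
  PySem.Str.endswith metric "_f1" ||
    (["exact_match", "f1_score", "bleu_score"].contains metric)

-- ===== PORT A =====
-- result['metrics'] : KeyError when missing → getD with an empty-dict default; exactly those inputs are excluded by Pre_.
-- A iterates all_metrics (a Python set) in hash order; the port iterates it in insertion
-- order — exact here because the returned value depends only on the truthiness of the dict built.
def analyze_metric_patterns_py (results : List (String × List (String × List (String × Int)))) : List String :=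
  let d := pvAsDict results
  let insights : List String := []
  let all_metrics : PySem.Set String :=
    d.values.foldl (fun s result =>
      PySem.Set.update s ((result.getD "metrics" PySem.Dict.empty).keys)) PySem.Set.empty
  let conditions : List String := d.keys
  let metric_correlations : PySem.Dict String (List Int) :=
    all_metrics.foldl (fun mc metric =>
      if pvQualifies metric then
        let scores := conditions.map (fun cond =>
          ((d.getD cond PySem.Dict.empty).getD "metrics" PySem.Dict.empty).getD metric 0)
        if PySem.Set.len (PySem.Set.ofList scores) > 1 then
          mc.insert metric scores
        else mc
      else mc) PySem.Dict.empty
  if metric_correlations.size ≠ 0 then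
    insights ++
      ["- Metric correlations suggest [TODO: implement correlation analysis]",
       "- ROUGE-L and F1 scores show [TODO: implement pattern analysis]"]
  else insights

-- ===== PORT B =====
-- r['metrics'] : KeyError when missing → getD with an empty-dict default; excluded by Pre_.
-- 'for m in (*a, *b)': the keys of a then the keys of b.
def pvPairVaries (a b : PySem.Dict String Int) : Bool :=
  (a.keys ++ b.keys).any (fun m => pvQualifies m && decide (a.getD m 0 ≠ b.getD m 0))

def analyze_metric_patterns_py_alt (results : List (String × List (String × List (String × Int)))) : List String :=
  let d := pvAsDict results
  let runs := d.values.map (fun r => r.getD "metrics" PySem.Dict.empty)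
  let changed := (runs.zip runs.tail).any (fun p => pvPairVaries p.1 p.2)
  if changed then
    ["- Metric correlations suggest [TODO: implement correlation analysis]",
     "- ROUGE-L and F1 scores show [TODO: implement pattern analysis]"]
  else []

-- ===== PRECONDITION & SPEC =====
-- Pre_ excludes exactly the inputs on which A (and B) raise KeyError: some condition's record lacks the key 'metrics'.
def Pre_analyze_metric_patterns_py (results : List (String × List (String × List (String × Int)))) : Prop :=
  ∀ r ∈ (pvAsDict results).values, r.contains "metrics" = true
instance (results : List (String × List (String × List (String × Int)))) : Decidable (Pre_analyze_metric_patterns_py results) := by unfold Pre_analyze_metric_patterns_py; infer_instance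

def pvWitness_analyze_metric_patterns_py : (List (String × List (String × List (String × Int)))) :=
  [("baseline", [("metrics", [("f1_score", 1)])]),
   ("treated",  [("metrics", [("f1_score", 2)])])]

def Spec_analyze_metric_patterns_py (results : List (String × List (String × List (String × Int)))) (out : List String) : Prop := out = analyze_metric_patterns_py_alt results
instance (results : List (String × List (String × List (String × Int)))) (out : List String) : Decidable (Spec_analyze_metric_patterns_py results out) := by unfold Spec_analyze_metric_patterns_py; infer_instance

-- ===== CLAIM (what is proved, stated in full; the proofs are below) =====
def Claim_equal_analyze_metric_patterns_py : Prop := ∀ (results : List (String × List (String × List (String × Int)))), Dom_analyze_metric_patterns_py results → Pre_analyze_metric_patterns_py results → Spec_analyze_metric_patterns_py results (analyze_metric_patterns_py results)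

-- ===== LEMMAS AND PROOFS =====

-- A conditional-insert loop builds a nonempty dict iff some element passes the condition (from an empty start).
theorem pv_size_foldl_insert_if {κ ν : Type} [BEq κ] [LawfulBEq κ]
    (c : κ → Bool) (v : κ → ν) :
    ∀ (l : List κ) (d0 : PySem.Dict κ ν),
      ((l.foldl (fun dd m => if c m then dd.insert m (v m) else dd) d0).size = 0) ↔
        (d0.size = 0 ∧ ∀ m ∈ l, c m = false) := by
  intro l
  induction l with
  | nil => intro d0; simp
  | cons x xs ih =>
    intro d0
    simp only [List.foldl_cons]
    by_cases hc : c x = true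
    · rw [hc]
      simp only [ih]
      constructor
      · rintro ⟨hsz, _⟩
        exfalso
        have : (d0.insert x (v x)).size ≠ 0 := by
          have hk : x ∈ (d0.insert x (v x)).keys := by
            rw [← PySem.Dict.contains_iff_mem_keys]
            exact PySem.Dict.contains_insert_self d0 x (v x)
          intro h0
          have : (d0.insert x (v x)).keys = [] := by
            have := List.length_eq_zero_iff.mp (by simpa [PySem.Dict.size, PySem.Dict.keys] using h0 : (d0.insert x (v x)).items.length = 0)
            simp [PySem.Dict.keys, this]
          simp [this] at hk
        exact this hsz
      · rintro ⟨_, hall⟩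
        exact absurd (hall x (by simp)) (by simp [hc])
    · rw [Bool.not_eq_true] at hc
      rw [hc]
      simp only [if_neg Bool.false_ne_true, ih]
      constructor
      · rintro ⟨h0, hall⟩
        exact ⟨h0, by
          intro m hm
          rcases List.mem_cons.mp hm with h | h
          · subst h; exact hc
          · exact hall m h⟩
      · rintro ⟨h0, hall⟩
        exact ⟨h0, fun m hm => hall m (List.mem_cons_of_mem _ hm)⟩

-- membership in the metric-collecting loop
theorem pv_mem_foldl_update {α β : Type} [BEq α] [LawfulBEq α]
    (k : β → List α) (y : α) :
    ∀ (l : List β) (s0 : PySem.Set α),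
      (y ∈ l.foldl (fun s r => PySem.Set.update s (k r)) s0) ↔
        (y ∈ s0 ∨ ∃ r ∈ l, y ∈ k r) := by
  intro l
  induction l with
  | nil => intro s0; simp
  | cons x xs ih =>
    intro s0
    simp only [List.foldl_cons, ih, PySem.Set.mem_update]
    constructor
    · rintro (⟨h | h⟩ | ⟨r, hr, hy⟩)
      · exact Or.inl h
      · exact Or.inr ⟨x, by simp, h⟩
      · exact Or.inr ⟨r, List.mem_cons_of_mem _ hr, hy⟩
    · rintro (h | ⟨r, hr, hy⟩)
      · exact Or.inl (Or.inl h)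
      · rcases List.mem_cons.mp hr with h' | h'
        · subst h'; exact Or.inl (Or.inr hy)
        · exact Or.inr ⟨r, h', hy⟩

-- the keys of pvAsDict are Nodup
theorem pv_nodup_keys (results : List (String × List (String × List (String × Int)))) :
    (pvAsDict results).keys.Nodup := by
  unfold pvAsDict
  exact PySem.Dict.nodup_keys_ofList _

-- A's per-condition score list equals the per-value score list
theorem pv_scores_eq (results : List (String × List (String × List (String × Int)))) (m : String) :
    ((pvAsDict results).keys.map (fun cond =>
        (((pvAsDict results).getD cond PySem.Dict.empty).getD "metrics" PySem.Dict.empty).getD m 0))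
      = ((pvAsDict results).values.map (fun r => (r.getD "metrics" PySem.Dict.empty).getD m 0)) := by
  rw [PySem.Dict.values_eq_map_keys (pvAsDict results) (pv_nodup_keys results) PySem.Dict.empty]
  simp [List.map_map, Function.comp]

-- two dicts that disagree on m's value (default 0) have m among their keys
theorem pv_mem_keys_of_getD_ne (a b : PySem.Dict String Int) (m : String)
    (h : a.getD m 0 ≠ b.getD m 0) : m ∈ a.keys ∨ m ∈ b.keys := by
  by_contra hc
  push Not at hc
  have ha : a.getD m 0 = 0 := by
    have := Iff.mpr (PySem.Dict.get?_eq_none_iff_not_mem_keys a m) hc.1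
    simp [PySem.Dict.getD, this]
  have hb : b.getD m 0 = 0 := by
    have := Iff.mpr (PySem.Dict.get?_eq_none_iff_not_mem_keys b m) hc.2
    simp [PySem.Dict.getD, this]
  exact h (ha.trans hb.symm)

-- if no adjacent pair varies, every run has the head's value for each qualifying metric
theorem pv_const_of_adj_false (m : String) (hq : pvQualifies m = true) :
    ∀ (l : List (PySem.Dict String Int)) (x : PySem.Dict String Int),
      (((x :: l).zip l).any (fun p => pvPairVaries p.1 p.2)) = false →
      ∀ a ∈ l, a.getD m 0 = x.getD m 0 := by
  intro l
  induction l with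
  | nil => intro x _ a ha; simp at ha
  | cons y t ih =>
    intro x h a ha
    simp only [List.zip_cons_cons, List.any_cons, Bool.or_eq_false_iff] at h
    have hxy : x.getD m 0 = y.getD m 0 := by
      by_contra hne
      rcases pv_mem_keys_of_getD_ne x y m hne with hk | hk
      · have := List.any_eq_false.mp h.1 m (List.mem_append_left _ hk)
        simp [hq, hne] at this
      · have := List.any_eq_false.mp h.1 m (List.mem_append_right _ hk)
        simp [hq, hne] at this
    rcases List.mem_cons.mp ha with h' | h'
    · subst h'; exact hxy.symm
    · exact (ih y h.2 a h').trans hxy.symm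

-- any two runs agree on each qualifying metric when no adjacent pair varies
theorem pv_all_eq_of_adj_false (m : String) (hq : pvQualifies m = true)
    (l : List (PySem.Dict String Int))
    (h : ((l.zip l.tail).any (fun p => pvPairVaries p.1 p.2)) = false) :
    ∀ a ∈ l, ∀ b ∈ l, a.getD m 0 = b.getD m 0 := by
  cases l with
  | nil => intro a ha; simp at ha
  | cons x t =>
    intro a ha b hb
    have key : ∀ r ∈ x :: t, r.getD m 0 = x.getD m 0 := by
      intro r hr
      rcases List.mem_cons.mp hr with h' | h'
      · subst h'; rfl
      · exact pv_const_of_adj_false m hq t x h r h'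
    rw [key a ha, key b hb]

-- if some adjacent pair varies, a qualifying metric exists in some run's keys with two differing run values
theorem pv_adj_true_exists (l : List (PySem.Dict String Int))
    (h : ((l.zip l.tail).any (fun p => pvPairVaries p.1 p.2)) = true) :
    ∃ m, pvQualifies m = true ∧ (∃ r ∈ l, m ∈ r.keys) ∧
      ∃ a ∈ l, ∃ b ∈ l, a.getD m 0 ≠ b.getD m 0 := by
  rcases List.any_eq_true.mp h with ⟨p, hp, hv⟩
  have hmem := List.of_mem_zip hp
  have ha : p.1 ∈ l := hmem.1
  have hb : p.2 ∈ l := List.mem_of_mem_tail hmem.2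
  rcases List.any_eq_true.mp hv with ⟨m, hmk, hcond⟩
  simp only [Bool.and_eq_true, decide_eq_true_eq] at hcond
  obtain ⟨hq, hne'⟩ := hcond
  refine ⟨m, hq, ?_, p.1, ha, p.2, hb, hne'⟩
  rcases List.mem_append.mp hmk with hk | hk
  · exact ⟨p.1, ha, hk⟩
  · exact ⟨p.2, hb, hk⟩

-- len(set(l)) > 1 iff l has two distinct elements
theorem pv_setlen_gt_one (l : List Int) :
    (PySem.Set.len (PySem.Set.ofList l) > 1) ↔ ∃ x ∈ l, ∃ y ∈ l, x ≠ y := by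
  have hn : (PySem.Set.ofList l).Nodup := PySem.Set.nodup_ofList l
  have hm : ∀ x : Int, x ∈ PySem.Set.ofList l ↔ x ∈ l := fun x => PySem.Set.mem_ofList l x
  constructor
  · intro hlen
    match hs : PySem.Set.ofList l with
    | [] => rw [hs] at hlen; simp [PySem.Set.len] at hlen
    | [a] => rw [hs] at hlen; simp [PySem.Set.len] at hlen
    | a :: b :: t =>
      rw [hs] at hn hm
      have hab : a ≠ b := by
        have := (List.nodup_cons.mp hn).1
        intro he; exact this (he ▸ List.mem_cons_self ..)
      exact ⟨a, (hm a).mp (by simp), b, (hm b).mp (by simp), hab⟩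
  · rintro ⟨x, hx, y, hy, hxy⟩
    by_contra hle
    have hx' := (hm x).mpr hx
    have hy' := (hm y).mpr hy
    match hs : PySem.Set.ofList l with
    | [] => rw [hs] at hx'; simp at hx'
    | [a] =>
      rw [hs] at hx' hy'
      simp at hx' hy'
      exact hxy (hx'.trans hy'.symm)
    | a :: b :: t =>
      rw [hs] at hle
      simp [PySem.Set.len] at hle

-- ===== VERDICT (by name: the statement is the Claim_ definition above) =====
theorem analyze_metric_patterns_py_spec : Claim_equal_analyze_metric_patterns_py := by
  intro results _ _
  unfold Spec_analyze_metric_patterns_py analyze_metric_patterns_py analyze_metric_patterns_py_alt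
  dsimp only
  set d := pvAsDict results with hd
  set runs : List (PySem.Dict String Int) :=
    d.values.map (fun r => r.getD "metrics" PySem.Dict.empty) with hruns
  -- the common per-metric condition
  set c : String → Bool := fun m =>
    pvQualifies m && decide (PySem.Set.len (PySem.Set.ofList
      (d.values.map (fun r => (r.getD "metrics" PySem.Dict.empty).getD m 0))) > 1) with hc
  have hmapmap : ∀ m : String,
      d.values.map (fun r => (r.getD "metrics" PySem.Dict.empty).getD m 0)
        = runs.map (fun r => r.getD m 0) := by
    intro m; rw [hruns, List.map_map]; rfl
  -- A's nested ifs are the single conditional insert with condition c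
  have hstep : (fun (mc : PySem.Dict String (List Int)) metric =>
      if pvQualifies metric then
        let scores := d.keys.map (fun cond =>
          ((d.getD cond PySem.Dict.empty).getD "metrics" PySem.Dict.empty).getD metric 0)
        if PySem.Set.len (PySem.Set.ofList scores) > 1 then mc.insert metric scores else mc
      else mc)
      = (fun (mc : PySem.Dict String (List Int)) metric =>
          if c metric then
            mc.insert metric (d.values.map (fun r =>
              (r.getD "metrics" PySem.Dict.empty).getD metric 0))
          else mc) := by
    funext mc metric
    have hsc := pv_scores_eq results metric
    rw [← hd] at hsc
    simp only [hsc, hc, Bool.and_eq_true, decide_eq_true_eq]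
    by_cases h1 : pvQualifies metric = true
    · simp [h1]
    · simp [h1]
  rw [hstep]
  have hsize := pv_size_foldl_insert_if c
    (fun metric => d.values.map (fun r =>
      (r.getD "metrics" PySem.Dict.empty).getD metric 0))
    (d.values.foldl (fun s result =>
      PySem.Set.update s ((result.getD "metrics" PySem.Dict.empty).keys)) PySem.Set.empty)
    PySem.Dict.empty
  by_cases hvar : ((runs.zip runs.tail).any (fun p => pvPairVaries p.1 p.2)) = true
  · -- some adjacent pair varies ⇒ both sides return the two strings
    rcases pv_adj_true_exists runs hvar with ⟨m, hq, ⟨r, hr, hk⟩, a, ha, b, hb, hne⟩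
    have hcm : c m = true := by
      rw [hc]
      simp only [Bool.and_eq_true, decide_eq_true_eq]
      refine ⟨hq, ?_⟩
      rw [hmapmap m]
      exact (pv_setlen_gt_one _).mpr
        ⟨a.getD m 0, List.mem_map.mpr ⟨a, ha, rfl⟩,
         b.getD m 0, List.mem_map.mpr ⟨b, hb, rfl⟩, hne⟩
    have hmem : m ∈ d.values.foldl (fun s result =>
        PySem.Set.update s ((result.getD "metrics" PySem.Dict.empty).keys)) PySem.Set.empty := by
      rw [pv_mem_foldl_update]
      rcases List.mem_map.mp (hruns ▸ hr) with ⟨v, hv, hveq⟩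
      exact Or.inr ⟨v, hv, by rw [hveq]; exact hk⟩
    have hne0 : ¬ ((d.values.foldl (fun s result =>
        PySem.Set.update s ((result.getD "metrics" PySem.Dict.empty).keys)) PySem.Set.empty).foldl
          (fun mc metric => if c metric then
              mc.insert metric (d.values.map (fun r =>
                (r.getD "metrics" PySem.Dict.empty).getD metric 0))
            else mc) PySem.Dict.empty).size = 0 := by
      intro h0
      rcases hsize.mp h0 with ⟨_, hall⟩
      rw [hall m hmem] at hcm
      exact Bool.false_ne_true hcm
    simp only [PySem.Set.empty] at hne0
    simp [hvar, hne0]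
  · -- no adjacent pair varies ⇒ both sides return []
    have hvar' : ((runs.zip runs.tail).any (fun p => pvPairVaries p.1 p.2)) = false :=
      Bool.not_eq_true _ ▸ eq_false_of_ne_true hvar
    have hall : ∀ m ∈ d.values.foldl (fun s result =>
        PySem.Set.update s ((result.getD "metrics" PySem.Dict.empty).keys)) PySem.Set.empty,
        c m = false := by
      intro m _
      rw [hc]
      by_cases hq : pvQualifies m = true
      · have heq := pv_all_eq_of_adj_false m hq runs hvar'
        have : ¬ (PySem.Set.len (PySem.Set.ofList
            (d.values.map (fun r => (r.getD "metrics" PySem.Dict.empty).getD m 0))) > 1) := by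
          rw [hmapmap m]
          intro hgt
          rcases (pv_setlen_gt_one _).mp hgt with ⟨x, hx, y, hy, hxy⟩
          rcases List.mem_map.mp hx with ⟨a, ha, rfl⟩
          rcases List.mem_map.mp hy with ⟨b, hb, rfl⟩
          exact hxy (heq a ha b hb)
        simp only [PySem.Set.len] at this
        simp [hq]
        omega
      · simp [Bool.not_eq_true] at hq
        simp [hq]
    have hz := hsize.mpr ⟨rfl, hall⟩
    simp only [PySem.Set.empty] at hz
    simp [hvar', hz]
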